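-- pv_equiv track=rewrite | github.com/TTrema/exemploETL | main.py | transformar_dados
-- ===== SOURCE A (Python) =====
-- from collections import defaultdict
--
-- def transformar_dados(raw_data):
--     transformed_data = []
--
--     age_group_stats = defaultdict(lambda: {"count": 0, "deaths": 0})
--
--     for entry in raw_data:
--         if entry["current_status"] == "Laboratory-confirmed case":
--             transformed_entry = {
--                 "case_month": entry["case_month"],
--                 "res_state": entry["res_state"],
--                 "res_county": entry["res_county"],
--                 "age_group": entry["age_group"],
--                 "sex": entry["sex"],
--                 "death_yn": entry["death_yn"]
--             }
--             transformed_data.append(transformed_entry)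
--
--             age_group = entry["age_group"]
--             deaths = 1 if entry["death_yn"] == "Yes" else 0
--
--             age_group_stats[age_group]["count"] += 1
--             age_group_stats[age_group]["deaths"] += deaths
--
--     return transformed_data, age_group_stats
-- ===== SOURCE B (Python) =====
-- from collections import defaultdict
--
-- _KEYS = ("case_month", "res_state", "res_county", "age_group", "sex", "death_yn")
--
-- def transformar_dados(raw_data):
--     # stage 1: keep only confirmed cases
--     confirmed = [e for e in raw_data if e["current_status"] == "Laboratory-confirmed case"]
--     # stage 2: project the six fields
--     transformed_data = [{k: e[k] for k in _KEYS} for e in confirmed]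
--     # stage 3: build a hash index age_group -> list of raw death flags
--     groups = {}
--     for e in confirmed:
--         groups.setdefault(e["age_group"], []).append(e["death_yn"])
--     # stage 4: reduce each group once (no per-row counter updates)
--     age_group_stats = defaultdict(lambda: {"count": 0, "deaths": 0})
--     for ag, flags in groups.items():
--         age_group_stats[ag] = {"count": len(flags), "deaths": flags.count("Yes")}
--     return transformed_data, age_group_stats
-- ===== Notes on version B (the rewrite author's own statement) =====
-- stated objective: alternative
-- what changed: B replaces A's single-pass incremental per-row counter updates with a staged group-then-reduce pipeline: filter confirmed cases, project them, build a hash index from age group to the list of raw death flags, then compute each group's stats once with len() and list.count('Yes').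
import Mathlib
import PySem

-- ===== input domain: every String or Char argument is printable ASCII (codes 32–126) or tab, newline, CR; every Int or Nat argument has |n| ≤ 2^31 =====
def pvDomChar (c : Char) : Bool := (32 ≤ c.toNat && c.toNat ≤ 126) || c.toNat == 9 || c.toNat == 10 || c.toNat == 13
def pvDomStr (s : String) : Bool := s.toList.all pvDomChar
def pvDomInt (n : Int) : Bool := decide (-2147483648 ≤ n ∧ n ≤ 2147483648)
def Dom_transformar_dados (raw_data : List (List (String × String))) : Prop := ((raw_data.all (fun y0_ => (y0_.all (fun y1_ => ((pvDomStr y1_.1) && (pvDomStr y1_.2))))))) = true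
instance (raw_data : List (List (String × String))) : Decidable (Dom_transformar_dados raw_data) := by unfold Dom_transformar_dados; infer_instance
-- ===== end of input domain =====

-- B replaces A's single-pass per-row counter updates with a staged group-then-reduce
-- pipeline (filter, project, group raw death flags by age group, reduce each group once
-- with length/count); objective: alternative decomposition, not speed.

-- entry[k] for an entry given as an association list (first match; "" never used inside Pre_)
def pvEGet (e : List (String × String)) (k : String) : String :=
  ((PySem.Dict.mk e).get? k).getD ""

-- the defaultdict's default factory value {"count": 0, "deaths": 0}
def pvDefaultStat : PySem.Dict String Int :=
  PySem.Dict.ofList [("count", 0), ("deaths", 0)]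

-- ===== PORT A =====
def transformar_dados (raw_data : List (List (String × String))) : (List (List (String × String))) × (List (String × List (String × Int))) :=
  let res := raw_data.foldl
    (fun (st : List (List (String × String)) × PySem.Dict String (PySem.Dict String Int)) entry =>
      if pvEGet entry "current_status" == "Laboratory-confirmed case" then
        let transformed_entry :=
          [("case_month", pvEGet entry "case_month"),
           ("res_state", pvEGet entry "res_state"),
           ("res_county", pvEGet entry "res_county"),
           ("age_group", pvEGet entry "age_group"),
           ("sex", pvEGet entry "sex"),
           ("death_yn", pvEGet entry "death_yn")]
        let age_group := pvEGet entry "age_group"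
        let deaths : Int := if pvEGet entry "death_yn" == "Yes" then 1 else 0
        -- age_group_stats[age_group]["count"] += 1
        let s1 := st.2.modify age_group pvDefaultStat (fun d => d.modify "count" 0 (· + 1))
        -- age_group_stats[age_group]["deaths"] += deaths
        let s2 := s1.modify age_group pvDefaultStat (fun d => d.modify "deaths" 0 (· + deaths))
        (st.1 ++ [transformed_entry], s2)
      else st)
    ([], PySem.Dict.empty)
  (res.1, res.2.items.map (fun p => (p.1, p.2.items)))

-- ===== PORT B =====
def pvKeys : List String :=
  ["case_month", "res_state", "res_county", "age_group", "sex", "death_yn"]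

def transformar_dados_alt (raw_data : List (List (String × String))) : (List (List (String × String))) × (List (String × List (String × Int))) :=
  -- stage 1: keep only confirmed cases
  let confirmed := raw_data.filter
    (fun e => pvEGet e "current_status" == "Laboratory-confirmed case")
  -- stage 2: project the six fields ({k: e[k] for k in _KEYS})
  let transformed_data := confirmed.map (fun e => pvKeys.map (fun k => (k, pvEGet e k)))
  -- stage 3: hash index age_group -> list of raw death flags (setdefault + append)
  let groups := confirmed.foldl
    (fun (g : PySem.Dict String (List String)) e =>
      g.modify (pvEGet e "age_group") [] (fun l => l ++ [pvEGet e "death_yn"]))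
    PySem.Dict.empty
  -- stage 4: reduce each group once with len(flags) and flags.count("Yes")
  let age_group_stats := groups.items.map
    (fun p => (p.1, [("count", (p.2.length : Int)), ("deaths", (PySem.List.count p.2 "Yes" : Int))]))
  (transformed_data, age_group_stats)

-- ===== PRECONDITION & SPEC =====
-- Pre_ excludes exactly the inputs where Python A raises KeyError: an entry without
-- the "current_status" key, or a confirmed entry missing one of the six projected keys.
def Pre_transformar_dados (raw_data : List (List (String × String))) : Prop :=
  (raw_data.all (fun e =>
    (PySem.Dict.mk e).contains "current_status" &&
    (!(((PySem.Dict.mk e).get? "current_status").getD "" == "Laboratory-confirmed case") ||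
     (["case_month", "res_state", "res_county", "age_group", "sex", "death_yn"].all
        (fun k => (PySem.Dict.mk e).contains k))))) = true
instance (raw_data : List (List (String × String))) : Decidable (Pre_transformar_dados raw_data) := by
  unfold Pre_transformar_dados; infer_instance

def pvWitness_transformar_dados : (List (List (String × String))) :=
  [[("current_status", "Laboratory-confirmed case"), ("case_month", "2020-05"),
    ("res_state", "NY"), ("res_county", "KINGS"), ("age_group", "0 - 17 years"),
    ("sex", "Female"), ("death_yn", "No")],
   [("current_status", "Probable case")]]

def Spec_transformar_dados (raw_data : List (List (String × String))) (out : (List (List (String × String))) × (List (String × List (String × Int)))) : Prop := out = transformar_dados_alt raw_data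
instance (raw_data : List (List (String × String))) (out : (List (List (String × String))) × (List (String × List (String × Int)))) : Decidable (Spec_transformar_dados raw_data out) := by unfold Spec_transformar_dados; infer_instance

-- ===== CLAIM (what is proved, stated in full; the proofs are below) =====
def Claim_equal_transformar_dados : Prop := ∀ (raw_data : List (List (String × String))), Dom_transformar_dados raw_data → Pre_transformar_dados raw_data → Spec_transformar_dados raw_data (transformar_dados raw_data)

-- ===== LEMMAS AND PROOFS =====

-- A's per-confirmed-entry update of the stats dict
def pvStepA (d : PySem.Dict String (PySem.Dict String Int)) (e : List (String × String)) :
    PySem.Dict String (PySem.Dict String Int) :=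
  (d.modify (pvEGet e "age_group") pvDefaultStat (fun s => s.modify "count" 0 (· + 1))).modify
    (pvEGet e "age_group") pvDefaultStat
    (fun s => s.modify "deaths" 0 (· + (if pvEGet e "death_yn" == "Yes" then (1 : Int) else 0)))

-- B's per-confirmed-entry update of the flag-group dict
def pvStepG (g : PySem.Dict String (List String)) (e : List (String × String)) :
    PySem.Dict String (List String) :=
  g.modify (pvEGet e "age_group") [] (fun l => l ++ [pvEGet e "death_yn"])

-- the stats B computes for one group of flags
def pvStatOf (v : List String) : PySem.Dict String Int :=
  PySem.Dict.mk [("count", (v.length : Int)), ("deaths", (PySem.List.count v "Yes" : Int))]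

-- a flag-group dict viewed as a stats dict, valuewise
def pvMapVals (g : PySem.Dict String (List String)) : PySem.Dict String (PySem.Dict String Int) :=
  PySem.Dict.mk (g.items.map (fun p => (p.1, pvStatOf p.2)))

theorem pvMapVals_get? (g : PySem.Dict String (List String)) (k : String) :
    (pvMapVals g).get? k = (g.get? k).map pvStatOf := by
  obtain ⟨l⟩ := g
  induction l with
  | nil => rfl
  | cons p l ih =>
    simp only [pvMapVals, PySem.Dict.get?, List.map_cons, List.find?_cons] at *
    by_cases h : (p.1 == k) = true
    · simp [h]
    · simp [h] at *; exact ih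

theorem pvMapVals_contains (g : PySem.Dict String (List String)) (k : String) :
    (pvMapVals g).contains k = g.contains k := by
  simp [pvMapVals, PySem.Dict.contains, List.any_map, Function.comp_def]

theorem pvMapVals_insert (g : PySem.Dict String (List String)) (k : String) (v : List String) :
    pvMapVals (g.insert k v) = (pvMapVals g).insert k (pvStatOf v) := by
  simp only [PySem.Dict.insert, pvMapVals_contains g k]
  by_cases h : g.contains k = true <;>
    simp only [h, if_true, if_false, Bool.false_eq_true, pvMapVals,
      List.map_map, List.map_append, List.map_cons, List.map_nil]
  · congr 1
    apply List.map_congr_left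
    intro p _
    by_cases hp : p.1 = k <;> simp [hp]

-- composing A's two nested modifies at the same key
theorem modify_modify_self {κ ν : Type} [BEq κ] [LawfulBEq κ]
    (d : PySem.Dict κ ν) (k : κ) (d0 : ν) (f g : ν → ν) :
    (d.modify k d0 f).modify k d0 g = d.modify k d0 (fun x => g (f x)) := by
  simp [PySem.Dict.modify, PySem.Dict.getD_insert_self, PySem.Dict.insert_insert_self]

theorem pvStatOf_nil : pvStatOf [] = pvDefaultStat := by decide

-- d[k] = f(d.get(k, d0)) written out (definitional; used to rewrite one occurrence at a time)
theorem modify_eq_insert {κ ν : Type} [BEq κ] (d : PySem.Dict κ ν) (k : κ) (d0 : ν) (f : ν → ν) :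
    d.modify k d0 f = d.insert k (f (d.getD k d0)) := rfl

theorem pvMapVals_getD (g : PySem.Dict String (List String)) (k : String) :
    (pvMapVals g).getD k pvDefaultStat = pvStatOf (g.getD k []) := by
  simp only [PySem.Dict.getD, pvMapVals_get?]
  cases g.get? k <;> simp [pvStatOf_nil]

-- appending one flag to a group updates its stats exactly as A's per-row increments do
theorem pvStatOf_append (v : List String) (flag : String) :
    ((pvStatOf v).modify "count" 0 (· + 1)).modify "deaths" 0
        (· + (if flag == "Yes" then (1 : Int) else 0)) =
      pvStatOf (v ++ [flag]) := by
  simp only [pvStatOf, PySem.Dict.modify, PySem.Dict.insert, PySem.Dict.getD, PySem.Dict.get?,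
    PySem.Dict.contains, PySem.List.count]
  by_cases h : (flag == "Yes") = true <;> simp_all [List.count_append]

theorem pvStepA_mapVals (g : PySem.Dict String (List String)) (e : List (String × String)) :
    pvStepA (pvMapVals g) e = pvMapVals (pvStepG g e) := by
  unfold pvStepA pvStepG
  rw [modify_modify_self, modify_eq_insert]
  simp only [pvMapVals_getD]
  rw [pvStatOf_append, modify_eq_insert g, pvMapVals_insert]

-- the stats fold over confirmed entries is the valuewise view of the group fold
theorem pvFold_mapVals (l : List (List (String × String)))
    (g : PySem.Dict String (List String)) :
    l.foldl pvStepA (pvMapVals g) = pvMapVals (l.foldl pvStepG g) := by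
  induction l generalizing g with
  | nil => rfl
  | cons e l ih => rw [List.foldl_cons, List.foldl_cons, pvStepA_mapVals, ih]

-- A's combined fold splits: projected confirmed rows, and the stats fold over confirmed
theorem pvFold_split (l : List (List (String × String)))
    (ts : List (List (String × String)))
    (st : PySem.Dict String (PySem.Dict String Int)) :
    l.foldl
      (fun (st : List (List (String × String)) × PySem.Dict String (PySem.Dict String Int)) entry =>
        if pvEGet entry "current_status" == "Laboratory-confirmed case" then
          (st.1 ++ [[("case_month", pvEGet entry "case_month"),
             ("res_state", pvEGet entry "res_state"),
             ("res_county", pvEGet entry "res_county"),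
             ("age_group", pvEGet entry "age_group"),
             ("sex", pvEGet entry "sex"),
             ("death_yn", pvEGet entry "death_yn")]],
           pvStepA st.2 entry)
        else st)
      (ts, st) =
      (ts ++ ((l.filter (fun e => pvEGet e "current_status" == "Laboratory-confirmed case")).map
          (fun e => pvKeys.map (fun k => (k, pvEGet e k)))),
       (l.filter (fun e => pvEGet e "current_status" == "Laboratory-confirmed case")).foldl
         pvStepA st) := by
  induction l generalizing ts st with
  | nil => simp
  | cons a l ih =>
    by_cases h : (pvEGet a "current_status" == "Laboratory-confirmed case") = true
    · rw [List.foldl_cons]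
      simp only [h, if_true]
      rw [ih]
      simp [h, pvKeys]
    · rw [List.foldl_cons]
      simp only [h, Bool.false_eq_true, if_false]
      rw [ih]
      simp [h]

-- ===== VERDICT (by name: the statement is the Claim_ definition above) =====
theorem transformar_dados_spec : Claim_equal_transformar_dados := by
  intro raw_data _ _
  show transformar_dados raw_data = transformar_dados_alt raw_data
  unfold transformar_dados transformar_dados_alt
  rw [show (fun (st : List (List (String × String)) × PySem.Dict String (PySem.Dict String Int)) entry =>
      if pvEGet entry "current_status" == "Laboratory-confirmed case" then
        (st.1 ++ [[("case_month", pvEGet entry "case_month"),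
           ("res_state", pvEGet entry "res_state"),
           ("res_county", pvEGet entry "res_county"),
           ("age_group", pvEGet entry "age_group"),
           ("sex", pvEGet entry "sex"),
           ("death_yn", pvEGet entry "death_yn")]],
         (st.2.modify (pvEGet entry "age_group") pvDefaultStat (fun d => d.modify "count" 0 (· + 1))).modify
           (pvEGet entry "age_group") pvDefaultStat
           (fun d => d.modify "deaths" 0 (· + (if pvEGet entry "death_yn" == "Yes" then (1:Int) else 0))))
      else st) = (fun st entry =>
      if pvEGet entry "current_status" == "Laboratory-confirmed case" then
        (st.1 ++ [[("case_month", pvEGet entry "case_month"),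
           ("res_state", pvEGet entry "res_state"),
           ("res_county", pvEGet entry "res_county"),
           ("age_group", pvEGet entry "age_group"),
           ("sex", pvEGet entry "sex"),
           ("death_yn", pvEGet entry "death_yn")]],
         pvStepA st.2 entry)
      else st) from rfl]
  rw [pvFold_split]
  rw [show (PySem.Dict.empty : PySem.Dict String (PySem.Dict String Int)) =
      pvMapVals PySem.Dict.empty from rfl]
  rw [pvFold_mapVals]
  simp only [pvMapVals, List.map_map]
  rfl
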